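-- pv_equiv track=rewrite | github.com/NeuralStorm/Behavioral-Control-Programs | Primate_Joystick_Pull/joystick_pull/tools/time_sync/get_event_times.py | isolate_recording_start
-- ===== SOURCE A (Python) =====
-- def isolate_recording_start(events, target_idx):
--     found = True
--     idx = 0
--
--     out = []
--     for evt in events:
--         if evt['name'] != 'plexon_recording_start':
--             out.append(evt)
--         else:
--             if target_idx == idx:
--                 found = True
--                 out.append(evt)
--             idx += 1
--
--     assert found
--     return out
-- ===== SOURCE B (Python) =====
-- def isolate_recording_start(events, target_idx):
--     start_positions = [i for i, e in enumerate(events)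
--                        if e['name'] == 'plexon_recording_start']
--     if 0 <= target_idx < len(start_positions):
--         keep = start_positions[target_idx]
--     else:
--         keep = None
--     drop = set(start_positions)
--     if keep is not None:
--         drop.discard(keep)
--     return [e for i, e in enumerate(events) if i not in drop]
-- ===== Notes on version B (the rewrite author's own statement) =====
-- stated objective: alternative
-- what changed: Replaces A's single stateful loop (running start-counter with conditional append) by an index-first decomposition: one comprehension collects the positions of all 'plexon_recording_start' events, the kept position is picked by direct indexing, a set of positions to drop is built, and a second comprehension filters by index.
import Mathlib
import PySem

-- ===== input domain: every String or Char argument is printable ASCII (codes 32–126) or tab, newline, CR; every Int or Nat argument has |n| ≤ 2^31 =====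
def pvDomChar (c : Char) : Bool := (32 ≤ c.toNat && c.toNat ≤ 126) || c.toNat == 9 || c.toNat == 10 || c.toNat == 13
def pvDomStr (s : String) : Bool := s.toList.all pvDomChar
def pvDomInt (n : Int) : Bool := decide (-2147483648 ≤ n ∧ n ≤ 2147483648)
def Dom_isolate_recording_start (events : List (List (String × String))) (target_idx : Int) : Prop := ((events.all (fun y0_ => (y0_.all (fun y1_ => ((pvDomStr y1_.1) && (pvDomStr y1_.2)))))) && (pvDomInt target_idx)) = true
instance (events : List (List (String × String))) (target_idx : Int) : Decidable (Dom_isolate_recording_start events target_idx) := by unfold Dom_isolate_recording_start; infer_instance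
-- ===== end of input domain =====

-- B replaces A's single stateful loop by an index-first decomposition (collect start positions,
-- pick the kept one by direct indexing, filter by a drop set); alternative, same cost.


-- ===== PORT A =====
def isolate_recording_start (events : List (List (String × String))) (target_idx : Int) : List (List (String × String)) :=
  -- found = True; idx = 0; out = []; for evt in events: …; assert found (dead: found is never False); return out
  (events.foldl
    (fun (s : Int × List (List (String × String))) evt =>
      if PySem.Dict.getD (PySem.Dict.mk evt) "name" "" ≠ "plexon_recording_start" then
        (s.1, s.2 ++ [evt])
      else if target_idx = s.1 then
        (s.1 + 1, s.2 ++ [evt])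
      else
        (s.1 + 1, s.2))
    ((0 : Int), ([] : List (List (String × String))))).2

-- ===== PORT B =====
def isolate_recording_start_alt (events : List (List (String × String))) (target_idx : Int) : List (List (String × String)) :=
  let start_positions : List Int :=
    (PySem.List.enumerate events 0).filterMap
      (fun p => if PySem.Dict.getD (PySem.Dict.mk p.2) "name" "" = "plexon_recording_start" then some p.1 else none)
  let keep : Option Int :=
    if 0 ≤ target_idx ∧ target_idx < PySem.List.len start_positions then
      PySem.List.pyGet? start_positions target_idx
    else none
  let drop : PySem.Set Int :=
    match keep with
    | some k => PySem.Set.discard (PySem.Set.ofList start_positions) k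
    | none   => PySem.Set.ofList start_positions
  (PySem.List.enumerate events 0).filterMap
    (fun p => if PySem.Set.contains drop p.1 then none else some p.2)

-- ===== PRECONDITION & SPEC =====
-- Pre_ excludes exactly the inputs where some event dict has no 'name' key: there Python A raises KeyError.
def Pre_isolate_recording_start (events : List (List (String × String))) (target_idx : Int) : Prop :=
  events.all (fun evt => PySem.Dict.contains (PySem.Dict.mk evt) "name") = true
instance (events : List (List (String × String))) (target_idx : Int) : Decidable (Pre_isolate_recording_start events target_idx) := by unfold Pre_isolate_recording_start; infer_instance
def pvWitness_isolate_recording_start : (List (List (String × String))) × Int :=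
  ([[("name", "plexon_recording_start")], [("name", "x")], [("name", "plexon_recording_start")]], 1)

def Spec_isolate_recording_start (events : List (List (String × String))) (target_idx : Int) (out : List (List (String × String))) : Prop := out = isolate_recording_start_alt events target_idx
instance (events : List (List (String × String))) (target_idx : Int) (out : List (List (String × String))) : Decidable (Spec_isolate_recording_start events target_idx out) := by unfold Spec_isolate_recording_start; infer_instance

-- ===== CLAIM (what is proved, stated in full; the proofs are below) =====
def Claim_equal_isolate_recording_start : Prop := ∀ (events : List (List (String × String))) (target_idx : Int), Dom_isolate_recording_start events target_idx → Pre_isolate_recording_start events target_idx → Spec_isolate_recording_start events target_idx (isolate_recording_start events target_idx)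

-- ===== LEMMAS AND PROOFS =====

-- A's loop, as structural recursion: c is the running count of start events already seen.
def pvACore (t : Int) : List (List (String × String)) → Int → List (List (String × String))
  | [], _ => []
  | e :: es, c =>
    if PySem.Dict.getD (PySem.Dict.mk e) "name" "" ≠ "plexon_recording_start" then
      e :: pvACore t es c
    else if t = c then e :: pvACore t es (c + 1)
    else pvACore t es (c + 1)

-- positions (from offset i) of the start events, as structural recursion
def pvStarts : List (List (String × String)) → Int → List Int
  | [], _ => []
  | e :: es, i =>
    if PySem.Dict.getD (PySem.Dict.mk e) "name" "" = "plexon_recording_start" then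
      i :: pvStarts es (i + 1)
    else pvStarts es (i + 1)

-- B's drop set, from the full positions list g
def pvDrop (g : List Int) (t : Int) : PySem.Set Int :=
  match (if 0 ≤ t ∧ t < PySem.List.len g then PySem.List.pyGet? g t else none) with
  | some k => PySem.Set.discard (PySem.Set.ofList g) k
  | none   => PySem.Set.ofList g

-- B's second pass, as structural recursion with a fixed drop set
def pvBCore (drop : PySem.Set Int) : List (List (String × String)) → Int → List (List (String × String))
  | [], _ => []
  | e :: es, i =>
    if PySem.Set.contains drop i then pvBCore drop es (i + 1)
    else e :: pvBCore drop es (i + 1)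

theorem pvA_eq_core (t : Int) : ∀ (es : List (List (String × String))) (c : Int) (acc : List (List (String × String))),
    (es.foldl
      (fun (s : Int × List (List (String × String))) evt =>
        if PySem.Dict.getD (PySem.Dict.mk evt) "name" "" ≠ "plexon_recording_start" then
          (s.1, s.2 ++ [evt])
        else if t = s.1 then (s.1 + 1, s.2 ++ [evt])
        else (s.1 + 1, s.2))
      (c, acc)).2 = acc ++ pvACore t es c := by
  intro es
  induction es with
  | nil => intro c acc; simp [pvACore]
  | cons e es ih =>
    intro c acc
    by_cases h : PySem.Dict.getD (PySem.Dict.mk e) "name" "" = "plexon_recording_start"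
    · by_cases ht : t = c
      · have step : List.foldl
            (fun (s : Int × List (List (String × String))) evt =>
              if PySem.Dict.getD (PySem.Dict.mk evt) "name" "" ≠ "plexon_recording_start" then
                (s.1, s.2 ++ [evt])
              else if t = s.1 then (s.1 + 1, s.2 ++ [evt])
              else (s.1 + 1, s.2)) (c, acc) (e :: es)
            = List.foldl
            (fun (s : Int × List (List (String × String))) evt =>
              if PySem.Dict.getD (PySem.Dict.mk evt) "name" "" ≠ "plexon_recording_start" then
                (s.1, s.2 ++ [evt])
              else if t = s.1 then (s.1 + 1, s.2 ++ [evt])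
              else (s.1 + 1, s.2)) (c + 1, acc ++ [e]) es := by
          rw [List.foldl_cons]; congr 1; simp [h, ht]
        rw [step, ih]
        simp [pvACore, h, ht]
      · have step : List.foldl
            (fun (s : Int × List (List (String × String))) evt =>
              if PySem.Dict.getD (PySem.Dict.mk evt) "name" "" ≠ "plexon_recording_start" then
                (s.1, s.2 ++ [evt])
              else if t = s.1 then (s.1 + 1, s.2 ++ [evt])
              else (s.1 + 1, s.2)) (c, acc) (e :: es)
            = List.foldl
            (fun (s : Int × List (List (String × String))) evt =>
              if PySem.Dict.getD (PySem.Dict.mk evt) "name" "" ≠ "plexon_recording_start" then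
                (s.1, s.2 ++ [evt])
              else if t = s.1 then (s.1 + 1, s.2 ++ [evt])
              else (s.1 + 1, s.2)) (c + 1, acc) es := by
          rw [List.foldl_cons]; congr 1; simp [h, ht]
        rw [step, ih]
        simp [pvACore, h, ht]
    · have step : List.foldl
          (fun (s : Int × List (List (String × String))) evt =>
            if PySem.Dict.getD (PySem.Dict.mk evt) "name" "" ≠ "plexon_recording_start" then
              (s.1, s.2 ++ [evt])
            else if t = s.1 then (s.1 + 1, s.2 ++ [evt])
            else (s.1 + 1, s.2)) (c, acc) (e :: es)
          = List.foldl
          (fun (s : Int × List (List (String × String))) evt =>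
            if PySem.Dict.getD (PySem.Dict.mk evt) "name" "" ≠ "plexon_recording_start" then
              (s.1, s.2 ++ [evt])
            else if t = s.1 then (s.1 + 1, s.2 ++ [evt])
            else (s.1 + 1, s.2)) (c, acc ++ [e]) es := by
        rw [List.foldl_cons]; congr 1; simp [h]
      rw [step, ih]
      simp [pvACore, h]

theorem pvStarts_eq_filterMap : ∀ (es : List (List (String × String))) (i : Int),
    (PySem.List.enumerate es i).filterMap
      (fun p => if PySem.Dict.getD (PySem.Dict.mk p.2) "name" "" = "plexon_recording_start" then some p.1 else none)
      = pvStarts es i := by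
  intro es
  induction es with
  | nil => intro i; simp [pvStarts, PySem.List.enumerate_nil]
  | cons e es ih =>
    intro i
    by_cases h : PySem.Dict.getD (PySem.Dict.mk e) "name" "" = "plexon_recording_start" <;>
      simp [pvStarts, PySem.List.enumerate_cons, h, ih]

theorem pvB_eq_core (drop : PySem.Set Int) : ∀ (es : List (List (String × String))) (i : Int),
    (PySem.List.enumerate es i).filterMap
      (fun p => if PySem.Set.contains drop p.1 then none else some p.2) = pvBCore drop es i := by
  intro es
  induction es with
  | nil => intro i; simp [pvBCore, PySem.List.enumerate_nil]
  | cons e es ih =>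
    intro i
    rw [PySem.List.enumerate_cons]
    by_cases h : PySem.Set.contains drop i
    · have hmem : i ∈ drop := (PySem.Set.contains_iff _ _).mp h
      rw [List.filterMap_cons_none (by simp [hmem]), ih]
      simp [pvBCore, hmem]
    · have hmem : i ∉ drop := fun hm => h ((PySem.Set.contains_iff _ _).mpr hm)
      have hsc : (if drop.contains (i, e).1 = true then none else some (i, e).2) = some e := by
        simp [hmem]
      rw [List.filterMap_cons, hsc, ih, pvBCore, if_neg h]

theorem pvStarts_ge : ∀ (es : List (List (String × String))) (i x : Int), x ∈ pvStarts es i → i ≤ x := by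
  intro es
  induction es with
  | nil => intro i x hx; simp [pvStarts] at hx
  | cons e es ih =>
    intro i x hx
    by_cases h : PySem.Dict.getD (PySem.Dict.mk e) "name" "" = "plexon_recording_start" <;>
      simp [pvStarts, h] at hx
    · rcases hx with rfl | hx
      · exact le_refl x
      · exact le_trans (by omega) (ih (i + 1) x hx)
    · exact le_trans (by omega) (ih (i + 1) x hx)

theorem pvMem_drop (g : List Int) (t x : Int) :
    x ∈ pvDrop g t ↔ x ∈ g ∧ (if 0 ≤ t ∧ t < PySem.List.len g then PySem.List.pyGet? g t else none) ≠ some x := by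
  unfold pvDrop
  cases hk : (if 0 ≤ t ∧ t < PySem.List.len g then PySem.List.pyGet? g t else none) with
  | none => simp [PySem.Set.mem_ofList]
  | some k =>
    simp only [PySem.Set.mem_discard, PySem.Set.mem_ofList, ne_eq, Option.some.injEq]
    constructor
    · rintro ⟨h1, h2⟩; exact ⟨h1, fun hh => h2 hh.symm⟩
    · rintro ⟨h1, h2⟩; exact ⟨h1, fun hh => h2 hh.symm⟩

-- the main invariant: A's counter c is the length of the prefix `pre` of start positions already passed
theorem pvCore_eq (t : Int) : ∀ (es : List (List (String × String))) (pre : List Int) (i : Int),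
    (∀ x ∈ pre, x < i) →
    pvACore t es (pre.length : Int) = pvBCore (pvDrop (pre ++ pvStarts es i) t) es i := by
  intro es
  induction es with
  | nil => intro pre i _; simp [pvACore, pvBCore]
  | cons e es ih =>
    intro pre i hpre
    by_cases h : PySem.Dict.getD (PySem.Dict.mk e) "name" "" = "plexon_recording_start"
    · -- start event at position i; g = pre ++ i :: pvStarts es (i+1)
      have hg : pre ++ pvStarts (e :: es) i = pre ++ i :: pvStarts es (i + 1) := by
        simp [pvStarts, h]
      set g := pre ++ i :: pvStarts es (i + 1) with hgdef
      have hlen : PySem.List.len g = (pre.length : Int) + 1 + (pvStarts es (i + 1)).length := by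
        simp [PySem.List.len_eq, g]; ring
      have hkeep : (if 0 ≤ t ∧ t < PySem.List.len g then PySem.List.pyGet? g t else none) = some i
          ↔ t = (pre.length : Int) := by
        constructor
        · intro hx
          split at hx
          · rename_i hr
            have h0 : (0 : Int) ≤ t := hr.1
            have := PySem.List.pyGet?_of_nonneg (xs := g) (i := t) h0
            rw [this] at hx
            have hmem : g[t.toNat]? = some i := hx
            rcases Nat.lt_trichotomy t.toNat pre.length with hlt | heq | hgt
            · rw [List.getElem?_append_left hlt] at hmem
              have h1 : pre[t.toNat] = i := by
                rw [List.getElem?_eq_getElem hlt] at hmem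
                exact Option.some.inj hmem
              have h2 := hpre pre[t.toNat] (List.getElem_mem hlt)
              omega
            · omega
            · rw [List.getElem?_append_right (by omega)] at hmem
              rcases Nat.exists_eq_add_of_lt hgt with ⟨k, hk⟩
              have hidx : t.toNat - pre.length = k + 1 := by omega
              rw [hidx] at hmem
              simp at hmem
              have hx2 : i + 1 ≤ i := by
                have hmem' : i ∈ pvStarts es (i + 1) := by
                  exact List.mem_of_getElem? hmem
                exact pvStarts_ge es (i + 1) i hmem'
              omega
          · exact absurd hx (by simp)
        · intro hx
          have hr : 0 ≤ t ∧ t < PySem.List.len g := by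
            constructor
            · omega
            · rw [hlen]; omega
          rw [if_pos hr, hx]
          exact PySem.List.pyGet?_append_length (pre := pre) (y := i) (ys := pvStarts es (i + 1))
      by_cases ht : t = (pre.length : Int)
      · -- kept: i ∉ drop
        have hnot : ¬ i ∈ pvDrop g t := by
          rw [pvMem_drop]
          intro hx
          exact hx.2 (hkeep.mpr ht)
        have hrec := ih (pre ++ [i]) (i + 1) (by
          intro x hx
          rcases List.mem_append.mp hx with hx | hx
          · have := hpre x hx; omega
          · simp at hx; omega)
        rw [hg]
        have hA : pvACore t (e :: es) (pre.length : Int) = e :: pvACore t es ((pre.length : Int) + 1) := by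
          simp [pvACore, h, ht]
        have hB : pvBCore (pvDrop g t) (e :: es) i = e :: pvBCore (pvDrop g t) es (i + 1) := by
          simp [pvBCore, hnot]
        rw [hA, hB]
        have hcast : ((pre ++ [i]).length : Int) = (pre.length : Int) + 1 := by simp
        have happ : (pre ++ [i]) ++ pvStarts es (i + 1) = g := by simp [g]
        rw [hcast, happ] at hrec
        rw [hrec]
      · -- not kept: i ∈ drop
        have hmem : i ∈ pvDrop g t := by
          rw [pvMem_drop]
          refine ⟨by simp [g], ?_⟩
          intro hc
          exact ht (hkeep.mp hc)
        have hrec := ih (pre ++ [i]) (i + 1) (by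
          intro x hx
          rcases List.mem_append.mp hx with hx | hx
          · have := hpre x hx; omega
          · simp at hx; omega)
        rw [hg]
        have hA : pvACore t (e :: es) (pre.length : Int) = pvACore t es ((pre.length : Int) + 1) := by
          simp [pvACore, h, ht]
        have hB : pvBCore (pvDrop g t) (e :: es) i = pvBCore (pvDrop g t) es (i + 1) := by
          simp [pvBCore, hmem]
        rw [hA, hB]
        have hcast : ((pre ++ [i]).length : Int) = (pre.length : Int) + 1 := by simp
        have happ : (pre ++ [i]) ++ pvStarts es (i + 1) = g := by simp [g]
        rw [hcast, happ] at hrec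
        rw [hrec]
    · -- non-start event at i: position i is in neither the starts list nor the drop set
      have hg : pre ++ pvStarts (e :: es) i = pre ++ pvStarts es (i + 1) := by
        simp [pvStarts, h]
      have hnot : ¬ i ∈ pvDrop (pre ++ pvStarts es (i + 1)) t := by
        rw [pvMem_drop]
        intro hx
        rcases List.mem_append.mp hx.1 with hy | hy
        · have := hpre i hy; omega
        · have := pvStarts_ge es (i + 1) i hy; omega
      have hrec := ih pre (i + 1) (by intro x hx; have := hpre x hx; omega)
      rw [hg]
      have hA : pvACore t (e :: es) (pre.length : Int) = e :: pvACore t es (pre.length : Int) := by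
        simp [pvACore, h]
      have hB : pvBCore (pvDrop (pre ++ pvStarts es (i + 1)) t) (e :: es) i
          = e :: pvBCore (pvDrop (pre ++ pvStarts es (i + 1)) t) es (i + 1) := by
        simp [pvBCore, hnot]
      rw [hA, hB, hrec]

-- ===== VERDICT (by name: the statement is the Claim_ definition above) =====
theorem isolate_recording_start_spec : Claim_equal_isolate_recording_start := by
  intro events target_idx _ _
  show isolate_recording_start events target_idx = isolate_recording_start_alt events target_idx
  have hA : isolate_recording_start events target_idx = pvACore target_idx events 0 := by
    unfold isolate_recording_start
    rw [pvA_eq_core]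
    simp
  have hB : isolate_recording_start_alt events target_idx
      = pvBCore (pvDrop (pvStarts events 0) target_idx) events 0 := by
    simp only [isolate_recording_start_alt]
    rw [pvStarts_eq_filterMap, pvB_eq_core]
    rfl
  rw [hA, hB]
  simpa using pvCore_eq target_idx events [] 0 (by simp)
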